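-- pv_equiv track=rewrite | github.com/xulangping/Parsing | diff.py | delete_ht
-- ===== SOURCE A (Python) =====
-- def delete_ht(s1, s2):
--     a1 = s1.split(' ')
--     a2 = s2.split(' ')
--     i = 0
--     try:
--         while a1[i] == a2[i]:
--             i += 1
--     except:
--         pass
--     a1 = a1[i:]
--     a2 = a2[i:]
--     a1_re = a1[::-1]
--     a2_re = a2[::-1]
--     i = 0
--     try:
--         while a1_re[i] == a2_re[i]:
--             i += 1
--     except:
--         pass
--     a1_re = a1_re[i:]
--     a2_re = a2_re[i:]
--     return a1_re[::-1], a2_re[::-1]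
-- ===== SOURCE B (Python) =====
-- def delete_ht(s1, s2):
--     a1 = s1.split(' ')
--     a2 = s2.split(' ')
--
--     def lc(x, y):
--         # largest k <= min(len(x),len(y)) with x[:k] == y[:k], found by binary
--         # search: slice-prefix equality is monotone (downward closed) in k.
--         lo, hi = 0, min(len(x), len(y))
--         while lo < hi:
--             mid = (lo + hi + 1) // 2
--             if x[:mid] == y[:mid]:
--                 lo = mid
--             else:
--                 hi = mid - 1
--         return lo
--
--     p = lc(a1, a2)
--     r1, r2 = a1[p:], a2[p:]
--     s = lc(r1[::-1], r2[::-1])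
--     return r1[:len(r1) - s], r2[:len(r2) - s]
-- ===== Notes on version B (the rewrite author's own statement) =====
-- stated objective: alternative
-- what changed: B replaces A's token-by-token try/except scans with a binary search on the monotone slice-equality predicate a1[:k]==a2[:k] (and on the reversed remainders for the suffix), then cuts each side with one slice instead of A's reverse/scan/drop/reverse.
import Mathlib
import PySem

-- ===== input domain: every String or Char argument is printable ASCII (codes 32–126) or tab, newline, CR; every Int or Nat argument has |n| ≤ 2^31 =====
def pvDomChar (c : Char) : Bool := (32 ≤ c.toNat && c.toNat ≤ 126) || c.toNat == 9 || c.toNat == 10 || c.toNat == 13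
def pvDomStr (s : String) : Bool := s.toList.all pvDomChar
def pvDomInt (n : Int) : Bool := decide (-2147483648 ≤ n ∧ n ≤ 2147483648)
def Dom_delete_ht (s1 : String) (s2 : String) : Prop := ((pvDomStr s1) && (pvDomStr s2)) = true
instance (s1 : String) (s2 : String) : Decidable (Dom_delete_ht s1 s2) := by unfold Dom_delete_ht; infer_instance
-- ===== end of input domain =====

-- B finds the common-prefix/common-suffix token counts by binary search on the monotone
-- slice-equality predicate instead of A's linear try/except scans (alternative algorithm).

-- ===== PORT A =====
-- s.split(' ') (exact: PySem.Chars.splitOn is Python's str.split with a non-empty separator)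
def pvSplitSp (s : String) : List String := (PySem.Chars.splitOn s.toList [' ']).map String.ofList

-- A's 'while a1[i] == a2[i]: i += 1' inside try/except: stop on IndexError (either index
-- out of range) or mismatch; returns the final i.
def pvScanA (a1 a2 : List String) (i : Nat) : Nat :=
  match h1 : a1[i]?, h2 : a2[i]? with
  | some x, some y => if x = y then pvScanA a1 a2 (i+1) else i
  | _, _ => i
termination_by a1.length - i
decreasing_by
  have : i < a1.length := by
    by_contra h
    simp [List.getElem?_eq_none (by omega : a1.length ≤ i)] at h1
  omega

def delete_ht (s1 : String) (s2 : String) : List String × List String :=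
  let a1 := pvSplitSp s1
  let a2 := pvSplitSp s2
  let i := pvScanA a1 a2 0
  let a1' := a1.drop i
  let a2' := a2.drop i
  let a1re := a1'.reverse
  let a2re := a2'.reverse
  let j := pvScanA a1re a2re 0
  ((a1re.drop j).reverse, (a2re.drop j).reverse)

-- ===== PORT B =====
-- B's binary search: largest k ≤ hi with x[:k] == y[:k] (slice equality is monotone in k).
def pvLC (x y : List String) (lo hi : Nat) : Nat :=
  if _ : lo < hi then
    let mid := (lo + hi + 1) / 2
    if x.take mid = y.take mid then pvLC x y mid hi else pvLC x y lo (mid - 1)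
  else lo
termination_by hi - lo
decreasing_by all_goals omega

def delete_ht_alt (s1 : String) (s2 : String) : List String × List String :=
  let a1 := pvSplitSp s1
  let a2 := pvSplitSp s2
  let p := pvLC a1 a2 0 (min a1.length a2.length)
  let r1 := a1.drop p
  let r2 := a2.drop p
  let s := pvLC r1.reverse r2.reverse 0 (min r1.reverse.length r2.reverse.length)
  (r1.take (r1.length - s), r2.take (r2.length - s))

-- ===== PRECONDITION & SPEC =====
def Spec_delete_ht (s1 : String) (s2 : String) (out : List String × List String) : Prop := out = delete_ht_alt s1 s2
instance (s1 : String) (s2 : String) (out : List String × List String) : Decidable (Spec_delete_ht s1 s2 out) := by unfold Spec_delete_ht; infer_instance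

-- ===== CLAIM (what is proved, stated in full; the proofs are below) =====
def Claim_equal_delete_ht : Prop := ∀ (s1 : String) (s2 : String), Dom_delete_ht s1 s2 → Spec_delete_ht s1 s2 (delete_ht s1 s2)

-- ===== LEMMAS AND PROOFS =====

lemma scanA_mem (x y : List String) (i : Nat) :
    ∀ j, i ≤ j → j < pvScanA x y i → x[j]? = y[j]? := by
  fun_induction pvScanA x y i with
  | case1 i a h2 h1 ih =>
    intro j hij hj
    rcases Nat.eq_or_lt_of_le hij with rfl | hlt
    · rw [h1, h2]
    · exact ih j hlt hj
  | case2 i a b h1 h2 hne => intro j hij hj; omega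
  | case3 i h => intro j hij hj; omega

lemma scanA_stop (x y : List String) (i : Nat) :
    x[pvScanA x y i]? = y[pvScanA x y i]? → x[pvScanA x y i]? = none := by
  fun_induction pvScanA x y i with
  | case1 i a h2 h1 ih => exact ih
  | case2 i a b h1 h2 hne =>
    intro he; rw [h1, h2] at he; exact absurd (Option.some.inj he) hne
  | case3 i h =>
    intro he
    cases hx : x[i]? with
    | none => rfl
    | some a =>
      rw [hx] at he
      exact (h a a hx he.symm).elim

lemma scanA_le_min (x y : List String) (i : Nat) (h : i ≤ min x.length y.length) :
    pvScanA x y i ≤ min x.length y.length := by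
  fun_induction pvScanA x y i with
  | case1 i a h2 h1 ih =>
    apply ih
    have hx : i < x.length := by
      by_contra hc; simp [List.getElem?_eq_none (by omega : x.length ≤ i)] at h1
    have hy : i < y.length := by
      by_contra hc; simp [List.getElem?_eq_none (by omega : y.length ≤ i)] at h2
    omega
  | case2 i a b h1 h2 hne => omega
  | case3 i h => omega

-- characterization: for k ≤ min length, take-k equality holds iff k ≤ scan result
lemma take_eq_iff_le_scan (x y : List String) (k : Nat) (hk : k ≤ min x.length y.length) :
    (x.take k = y.take k ↔ k ≤ pvScanA x y 0) := by
  constructor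
  · intro he
    by_contra hgt
    set p := pvScanA x y 0 with hp
    have hpk : p < k := by omega
    have hpj : x[p]? = y[p]? := by
      have h1 := congrArg (fun l => l[p]?) he
      simpa [List.getElem?_take, hpk] using h1
    have := scanA_stop x y 0 hpj
    rw [List.getElem?_eq_none_iff] at this
    omega
  · intro hle
    apply List.ext_getElem?
    intro j
    rw [List.getElem?_take, List.getElem?_take]
    by_cases hj : j < k
    · rw [if_pos hj, if_pos hj]
      exact scanA_mem x y 0 j (Nat.zero_le j) (by omega)
    · rw [if_neg hj, if_neg hj]

lemma lc_eq_scan_aux (x y : List String) (lo hi : Nat) :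
    lo ≤ pvScanA x y 0 → pvScanA x y 0 ≤ hi → hi ≤ min x.length y.length →
    pvLC x y lo hi = pvScanA x y 0 := by
  fun_induction pvLC x y lo hi with
  | case1 lo hi hlt mid heq ih =>
    intro hlo hhi hm
    have hmid : mid = (lo + hi + 1) / 2 := rfl
    exact ih ((take_eq_iff_le_scan x y mid (by omega)).mp heq) hhi hm
  | case2 lo hi hlt mid hne ih =>
    intro hlo hhi hm
    have hmid : mid = (lo + hi + 1) / 2 := rfl
    have hnp : ¬ (mid ≤ pvScanA x y 0) := fun hle =>
      hne ((take_eq_iff_le_scan x y mid (by omega)).mpr hle)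
    exact ih hlo (by omega) (by omega)
  | case3 lo hi hge => intro hlo hhi hm; omega

lemma lc_eq_scan (x y : List String) :
    pvLC x y 0 (min x.length y.length) = pvScanA x y 0 :=
  lc_eq_scan_aux x y 0 _ (Nat.zero_le _)
    (scanA_le_min x y 0 (Nat.zero_le _)) le_rfl

lemma rev_drop_rev (l : List String) (s : Nat) :
    (l.reverse.drop s).reverse = l.take (l.length - s) := by
  rw [List.drop_reverse, List.reverse_reverse]

-- ===== VERDICT (by name: the statement is the Claim_ definition above) =====
theorem delete_ht_spec : Claim_equal_delete_ht := by
  intro s1 s2 _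
  unfold Spec_delete_ht
  simp only [delete_ht, delete_ht_alt]
  rw [lc_eq_scan, lc_eq_scan]
  rw [rev_drop_rev, rev_drop_rev]
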